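-- pv_equiv track=rewrite | github.com/belfaunder/DDRS | src/main/discount_strategy/util/set_scenario_matrix.py | set_scenarios
-- ===== SOURCE A (Python) =====
-- def set_scenarios(size, first_param, second_param):
--     K = {}
--     k = 0
--     while k < 2 ** size:
--         K[k] = {}
--         k += 1
--     set_customer = range(1, (size + 1))
--     for i in set_customer:
--         K[0][i] = first_param
--
--     for i in set_customer:
--         temp = 1
--         k = 1
--         while temp <= 2 ** (i - 1):
--             while k < 2 ** (size - i) * (2 * temp - 1):
--                 K[k][i] = first_param
--                 k += 1
--             while k < 2 ** (size - i) * (2 * temp):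
--                 K[k][i] = second_param
--                 k += 1
--             temp += 1
--     return K
-- ===== SOURCE B (Python) =====
-- def set_scenarios(size, first_param, second_param):
--     # Scenario-major: build each scenario's row directly from the bits of k.
--     # The `while k < 2 ** size` guard is kept as in A so degenerate negative
--     # sizes (float 2**size) behave identically.
--     K = {}
--     k = 0
--     while k < 2 ** size:
--         row = {}
--         for i in range(1, size + 1):
--             bit = (k // 2 ** (size - i)) % 2
--             row[i] = second_param if bit else first_param
--         K[k] = row
--         k += 1
--     return K
-- ===== Notes on version B (the rewrite author's own statement) =====
-- stated objective: simpler
-- what changed: B replaces A's per-customer block-filling sweeps (init pass, row-0 pass, and a nested temp/while machinery per customer) by a single scenario-major loop that builds each row directly from the bits of k via (k // 2**(size-i)) % 2.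
import Mathlib
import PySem

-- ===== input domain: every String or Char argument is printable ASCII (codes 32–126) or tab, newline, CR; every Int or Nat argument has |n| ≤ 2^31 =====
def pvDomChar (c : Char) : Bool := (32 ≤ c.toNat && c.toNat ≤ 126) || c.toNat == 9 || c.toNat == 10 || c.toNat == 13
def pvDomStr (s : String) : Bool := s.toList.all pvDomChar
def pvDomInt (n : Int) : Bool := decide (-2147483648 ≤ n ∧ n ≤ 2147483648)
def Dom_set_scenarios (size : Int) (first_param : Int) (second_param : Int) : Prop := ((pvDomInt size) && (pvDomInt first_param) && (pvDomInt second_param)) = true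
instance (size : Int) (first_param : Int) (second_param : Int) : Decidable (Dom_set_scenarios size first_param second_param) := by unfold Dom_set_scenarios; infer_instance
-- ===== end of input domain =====

-- B builds each scenario row directly from the bits of k (scenario-major, one pass) instead of
-- A's per-customer block-filling sweeps; simpler decomposition, same return value.

-- ===== PORT A =====
-- Python `k < 2 ** size`: for size ≥ 0 it is the integer comparison k < 2^size; for
-- -1074 ≤ size < 0, `2 ** size` is a float in (0,1), so for integer k it is equivalent to
-- k < 1; for size < -1074 the float underflows to exactly 0.0, so it is k < 0.
def pvLtPow2A (k size : Int) : Bool :=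
  if 0 ≤ size then decide (k < (2 : Int) ^ size.toNat)
  else if -1074 ≤ size then decide (k < 1) else decide (k < 0)

-- `while k < 2 ** size: K[k] = {}; k += 1` (fuel bounds the iteration count; the condition is tested each step)
def pvInitLoopA (size : Int) : Nat → Int → PySem.Dict Int (PySem.Dict Int Int) → PySem.Dict Int (PySem.Dict Int Int)
  | 0, _, K => K
  | fuel+1, k, K =>
      if pvLtPow2A k size then pvInitLoopA size fuel (k+1) (K.insert k PySem.Dict.empty) else K

-- `while k < bound: K[k][i] = v; k += 1`  (K[k] always exists here, so `K[k][i] = v` is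
-- `K.insert k ((K.getD k {}).insert i v)`: overwrite-in-place keeps insertion order, exactly Python)
def pvAssignA (i v bound : Int) : Nat → Int → PySem.Dict Int (PySem.Dict Int Int) → Int × PySem.Dict Int (PySem.Dict Int Int)
  | 0, k, K => (k, K)
  | fuel+1, k, K =>
      if k < bound then
        pvAssignA i v bound fuel (k+1) (K.insert k ((K.getD k PySem.Dict.empty).insert i v))
      else (k, K)

-- `while temp <= 2 ** (i - 1): <first block> <second block>; temp += 1`  (i ≥ 1 and i ≤ size at every call)
def pvTempLoopA (size fp sp i : Int) : Nat → Int → Int → PySem.Dict Int (PySem.Dict Int Int) → PySem.Dict Int (PySem.Dict Int Int)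
  | 0, _, _, K => K
  | fuel+1, temp, k, K =>
      if temp ≤ (2 : Int) ^ (i - 1).toNat then
        let b1 : Int := (2 : Int) ^ (size - i).toNat * (2 * temp - 1)
        let r1 := pvAssignA i fp b1 (b1 - k).toNat k K
        let b2 : Int := (2 : Int) ^ (size - i).toNat * (2 * temp)
        let r2 := pvAssignA i sp b2 (b2 - r1.1).toNat r1.1 r1.2
        pvTempLoopA size fp sp i fuel (temp + 1) r2.1 r2.2
      else K

def set_scenarios (size : Int) (first_param : Int) (second_param : Int) : List (Int × List (Int × Int)) :=
  ((PySem.List.pyRange 1 (size+1) 1).foldl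
      (fun K i => pvTempLoopA size first_param second_param i ((2 : Int) ^ (i - 1).toNat).toNat 1 1 K)
      ((PySem.List.pyRange 1 (size+1) 1).foldl
          (fun K i => K.insert 0 ((K.getD 0 PySem.Dict.empty).insert i first_param))
          (pvInitLoopA size (if 0 ≤ size then 2 ^ size.toNat else 1) 0 PySem.Dict.empty))).items.map
    (fun p => (p.1, p.2.items))

-- ===== PORT B =====
-- same float comparison note as on the A side (k < 1 for -1074 ≤ size < 0; k < 0 below, underflow)
def pvLtPow2B (k size : Int) : Bool :=
  if 0 ≤ size then decide (k < (2 : Int) ^ size.toNat)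
  else if -1074 ≤ size then decide (k < 1) else decide (k < 0)

-- `row = {}; for i in range(1, size+1): bit = (k // 2**(size-i)) % 2; row[i] = sp if bit else fp`
def pvRowB (size fp sp k : Int) : PySem.Dict Int Int :=
  (PySem.List.pyRange 1 (size+1) 1).foldl
    (fun d i =>
      let bit := PySem.Int.mod (PySem.Int.floordiv k ((2 : Int) ^ (size - i).toNat)) 2
      d.insert i (if bit ≠ 0 then sp else fp))
    PySem.Dict.empty

-- `while k < 2 ** size: K[k] = row; k += 1`
def pvScenLoopB (size fp sp : Int) : Nat → Int → PySem.Dict Int (PySem.Dict Int Int) → PySem.Dict Int (PySem.Dict Int Int)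
  | 0, _, K => K
  | fuel+1, k, K =>
      if pvLtPow2B k size then pvScenLoopB size fp sp fuel (k+1) (K.insert k (pvRowB size fp sp k)) else K

def set_scenarios_alt (size : Int) (first_param : Int) (second_param : Int) : List (Int × List (Int × Int)) :=
  (pvScenLoopB size first_param second_param (if 0 ≤ size then 2 ^ size.toNat else 1) 0 PySem.Dict.empty).items.map
    (fun p => (p.1, p.2.items))

-- ===== PRECONDITION & SPEC =====
def Spec_set_scenarios (size : Int) (first_param : Int) (second_param : Int) (out : List (Int × List (Int × Int))) : Prop := out = set_scenarios_alt size first_param second_param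
instance (size : Int) (first_param : Int) (second_param : Int) (out : List (Int × List (Int × Int))) : Decidable (Spec_set_scenarios size first_param second_param out) := by unfold Spec_set_scenarios; infer_instance

-- ===== CLAIM (what is proved, stated in full; the proofs are below) =====
def Claim_equal_set_scenarios : Prop := ∀ (size : Int) (first_param : Int) (second_param : Int), Dom_set_scenarios size first_param second_param → Spec_set_scenarios size first_param second_param (set_scenarios size first_param second_param)

-- ===== LEMMAS AND PROOFS =====

-- number of scenarios Python's while creates: 2^size for size ≥ 0, one for -1074 ≤ size < 0
-- (the float 2**size is still positive there), none below (2**size underflows to 0.0)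
def pvN (size : Int) : Nat :=
  if 0 ≤ size then 2 ^ size.toNat else if -1074 ≤ size then 1 else 0

-- canonical shape of the scenario dict: keys 0..N-1 in order, row k given by f k
def pvRep (N : Nat) (f : Int → PySem.Dict Int Int) : PySem.Dict Int (PySem.Dict Int Int) :=
  PySem.Dict.mk ((List.range N).map (fun (j : Nat) => ((j : Int), f j)))

def pvQ (size i : Int) : Int := (2 : Int) ^ (size - i).toNat

-- the value A's sweeps leave in cell (k, i)
def pvVal (size fp sp i j : Int) : Int := if (j / pvQ size i) % 2 = 0 then fp else sp

lemma pvLtPow2A_eq (k size : Int) : pvLtPow2A k size = decide (k < (pvN size : Int)) := by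
  unfold pvLtPow2A pvN; split_ifs <;> simp

lemma pvLtPow2B_eq (k size : Int) : pvLtPow2B k size = decide (k < (pvN size : Int)) := by
  unfold pvLtPow2B pvN; split_ifs <;> simp

lemma pvRep_items (N : Nat) (f : Int → PySem.Dict Int Int) :
    (pvRep N f).items = (List.range N).map (fun (j : Nat) => ((j : Int), f j)) := rfl

lemma pvRep_congr {N : Nat} {f g : Int → PySem.Dict Int Int}
    (h : ∀ j : Int, 0 ≤ j → j < (N : Int) → f j = g j) : pvRep N f = pvRep N g := by
  unfold pvRep
  congr 1
  apply List.map_congr_left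
  intro a ha
  rw [List.mem_range] at ha
  rw [h (a : Int) (by positivity) (by exact_mod_cast ha)]

lemma pvRep_keys_nodup {N : Nat} {f : Int → PySem.Dict Int Int} : (pvRep N f).keys.Nodup := by
  unfold pvRep
  rw [PySem.Dict.keys_mk, List.map_map]
  exact List.nodup_range.map (fun a b hab => Int.natCast_inj.mp (by simpa using hab))

lemma pvRep_mem_items {N : Nat} {f : Int → PySem.Dict Int Int} {key : Int}
    (h0 : 0 ≤ key) (h : key < (N : Int)) : (key, f key) ∈ (pvRep N f).items := by
  obtain ⟨j, rfl⟩ := Int.eq_ofNat_of_zero_le h0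
  rw [pvRep_items]
  exact List.mem_map.2 ⟨j, List.mem_range.2 (by exact_mod_cast h), rfl⟩

lemma pvRep_getD {N : Nat} {f : Int → PySem.Dict Int Int} (key : Int)
    (h0 : 0 ≤ key) (h : key < (N : Int)) (d0 : PySem.Dict Int Int) :
    (pvRep N f).getD key d0 = f key :=
  PySem.Dict.getD_of_mem_items _ (pvRep_mem_items h0 h) pvRep_keys_nodup d0

lemma pvRep_contains {N : Nat} {f : Int → PySem.Dict Int Int} (key : Int)
    (h0 : 0 ≤ key) (h : key < (N : Int)) : (pvRep N f).contains key = true := by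
  rw [PySem.Dict.contains_eq_decide_mem_keys]
  refine decide_eq_true ?_
  have := pvRep_mem_items (f := f) h0 h
  show key ∈ (pvRep N f).items.map Prod.fst
  exact List.mem_map.2 ⟨(key, f key), this, rfl⟩

lemma pvRep_insert {N : Nat} {f : Int → PySem.Dict Int Int} (key : Int)
    (h0 : 0 ≤ key) (h : key < (N : Int)) (v : PySem.Dict Int Int) :
    (pvRep N f).insert key v = pvRep N (fun x => if x = key then v else f x) := by
  apply PySem.Dict.ext
  rw [PySem.Dict.items_insert_of_contains _ _ (pvRep_contains key h0 h)]
  rw [pvRep_items, pvRep_items, List.map_map]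
  apply List.map_congr_left
  intro a _
  by_cases haj : (a : Int) = key
  · simp [haj]
  · simp [haj]

-- the first while: starting at k with `fuel` iterations left to reach pvN, appends fresh keys k, k+1, …
lemma pvInitLoopA_items (size : Int) :
    ∀ (fuel : Nat) (k : Int) (K : PySem.Dict Int (PySem.Dict Int Int)), 0 ≤ k →
      k + (fuel : Int) = (pvN size : Int) → (∀ p ∈ K.items, p.1 < k) →
      pvInitLoopA size fuel k K =
        PySem.Dict.mk (K.items ++ (List.range fuel).map (fun (j : Nat) => (k + (j : Int), PySem.Dict.empty))) := by
  intro fuel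
  induction fuel with
  | zero =>
      intro k K _ _ _
      apply PySem.Dict.ext
      simp [pvInitLoopA]
  | succ n ih =>
      intro k K hk hsum hlt
      have hcond : pvLtPow2A k size = true := by
        rw [pvLtPow2A_eq]; refine decide_eq_true ?_; push_cast at hsum ⊢; omega
      have hnc : K.contains k = false := by
        rw [PySem.Dict.contains_eq_decide_mem_keys]
        refine decide_eq_false ?_
        intro hmem
        obtain ⟨p, hp, hpk⟩ := List.mem_map.1 hmem
        have := hlt p hp; omega
      have hinv : ∀ p ∈ (K.insert k PySem.Dict.empty).items, p.1 < k + 1 := by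
        intro p hp
        rw [PySem.Dict.items_insert_of_not_contains _ _ hnc] at hp
        rcases List.mem_append.1 hp with hmem | hmem
        · have := hlt p hmem; omega
        · rw [List.mem_singleton] at hmem
          have : p.1 = k := by rw [hmem]
          omega
      rw [pvInitLoopA, hcond]
      simp only [if_true]
      rw [ih (k+1) _ (by omega) (by push_cast at hsum ⊢; omega) hinv]
      apply PySem.Dict.ext
      show (K.insert k PySem.Dict.empty).items ++ _ = K.items ++ _
      rw [PySem.Dict.items_insert_of_not_contains _ _ hnc]
      rw [List.append_assoc, List.range_succ_eq_map, List.map_cons, List.map_map]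
      simp only [Nat.cast_zero, add_zero, List.singleton_append]
      congr 2
      apply List.map_congr_left
      intro a _
      simp only [Function.comp_apply]
      have hca : k + 1 + (a : Int) = k + ((Nat.succ a : Nat) : Int) := by push_cast; ring
      rw [hca]

-- B's while: same iteration pattern, payload pvRowB
lemma pvScenLoopB_items (size fp sp : Int) :
    ∀ (fuel : Nat) (k : Int) (K : PySem.Dict Int (PySem.Dict Int Int)), 0 ≤ k →
      k + (fuel : Int) = (pvN size : Int) → (∀ p ∈ K.items, p.1 < k) →
      pvScenLoopB size fp sp fuel k K =
        PySem.Dict.mk (K.items ++ (List.range fuel).map (fun (j : Nat) => (k + (j : Int), pvRowB size fp sp (k + (j : Int))))) := by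
  intro fuel
  induction fuel with
  | zero =>
      intro k K _ _ _
      apply PySem.Dict.ext
      simp [pvScenLoopB]
  | succ n ih =>
      intro k K hk hsum hlt
      have hcond : pvLtPow2B k size = true := by
        rw [pvLtPow2B_eq]; refine decide_eq_true ?_; push_cast at hsum ⊢; omega
      have hnc : K.contains k = false := by
        rw [PySem.Dict.contains_eq_decide_mem_keys]
        refine decide_eq_false ?_
        intro hmem
        obtain ⟨p, hp, hpk⟩ := List.mem_map.1 hmem
        have := hlt p hp; omega
      have hinv : ∀ p ∈ (K.insert k (pvRowB size fp sp k)).items, p.1 < k + 1 := by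
        intro p hp
        rw [PySem.Dict.items_insert_of_not_contains _ _ hnc] at hp
        rcases List.mem_append.1 hp with hmem | hmem
        · have := hlt p hmem; omega
        · rw [List.mem_singleton] at hmem
          have : p.1 = k := by rw [hmem]
          omega
      rw [pvScenLoopB, hcond]
      simp only [if_true]
      rw [ih (k+1) _ (by omega) (by push_cast at hsum ⊢; omega) hinv]
      apply PySem.Dict.ext
      show (K.insert k (pvRowB size fp sp k)).items ++ _ = K.items ++ _
      rw [PySem.Dict.items_insert_of_not_contains _ _ hnc]
      rw [List.append_assoc, List.range_succ_eq_map, List.map_cons, List.map_map]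
      simp only [Nat.cast_zero, add_zero, List.singleton_append]
      congr 2
      apply List.map_congr_left
      intro a _
      simp only [Function.comp_apply]
      have hca : k + 1 + (a : Int) = k + ((Nat.succ a : Nat) : Int) := by push_cast; ring
      rw [hca]

lemma pvDiv_eq {Q m j : Int} (hQ : 0 < Q) (h1 : Q * m ≤ j) (h2 : j < Q * (m + 1)) : j / Q = m := by
  have ha : m ≤ j / Q := (Int.le_ediv_iff_mul_le hQ).2 (by rw [mul_comm]; exact h1)
  have hb : j / Q < m + 1 := (Int.ediv_lt_iff_lt_mul hQ).2 (by rw [mul_comm]; exact h2)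
  omega

lemma pvQ_pos (size i : Int) : 0 < pvQ size i := pow_pos (by norm_num) _

-- an inner `while k < bound` sweep on the canonical shape inserts (i ↦ v) on [a, bound)
lemma pvAssignA_spec (i v bound : Int) (N : Nat) (hbN : bound ≤ (N : Int)) :
    ∀ (fuel : Nat) (a : Int) (f : Int → PySem.Dict Int Int), 0 ≤ a → fuel = (bound - a).toNat →
      pvAssignA i v bound fuel a (pvRep N f) =
        (max a bound, pvRep N (fun j => if a ≤ j ∧ j < bound then (f j).insert i v else f j)) := by
  intro fuel
  induction fuel with
  | zero =>
      intro a f ha hfu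
      have hba : bound ≤ a := by omega
      rw [pvAssignA]
      simp only [Prod.mk.injEq]
      refine ⟨by omega, ?_⟩
      exact pvRep_congr (fun j _ _ => by rw [if_neg (by omega)])
  | succ n ih =>
      intro a f ha hfu
      have hab : a < bound := by omega
      rw [pvAssignA, if_pos hab]
      rw [pvRep_getD a ha (by omega), pvRep_insert a ha (by omega)]
      rw [ih (a + 1) _ (by omega) (by omega)]
      simp only [Prod.mk.injEq]
      refine ⟨by omega, ?_⟩
      · apply pvRep_congr
        intro j _ _
        by_cases hja : j = a
        · rw [hja, if_neg (by omega), if_pos rfl, if_pos (by omega)]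
        · by_cases hcond : a + 1 ≤ j ∧ j < bound
          · rw [if_pos hcond, if_neg hja, if_pos (by omega)]
          · rw [if_neg hcond, if_neg hja, if_neg (by omega)]

-- the temp loop for customer i, entered at temp = t with the matching k, finishes the sweep:
-- every cell (j, i) with k ≤ j < N receives pvVal
lemma pvTempLoopA_spec (size fp sp i : Int) (h1i : 1 ≤ i) (his : i ≤ size) :
    ∀ (fuel : Nat) (t k : Int) (f : Int → PySem.Dict Int Int), 1 ≤ t →
      t + (fuel : Int) = (2 : Int) ^ (i - 1).toNat + 1 →
      k = (if t = 1 then 1 else pvQ size i * (2 * t - 2)) →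
      pvTempLoopA size fp sp i fuel t k (pvRep (pvN size) f) =
        pvRep (pvN size) (fun j => if k ≤ j ∧ j < ((pvN size : Nat) : Int) then (f j).insert i (pvVal size fp sp i j) else f j) := by
  have hQ := pvQ_pos size i
  have hQN : pvQ size i * (2 * (2 : Int) ^ (i - 1).toNat) = ((pvN size : Nat) : Int) := by
    unfold pvQ pvN
    rw [if_pos (by omega)]
    push_cast
    have he : (size - i).toNat + ((i - 1).toNat + 1) = size.toNat := by omega
    calc (2:Int) ^ (size - i).toNat * (2 * (2:Int) ^ (i - 1).toNat)
        = (2:Int) ^ ((size - i).toNat + ((i - 1).toNat + 1)) := by rw [pow_add, pow_succ]; ring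
      _ = (2:Int) ^ size.toNat := by rw [he]
  have hP1 : (1:Int) ≤ (2 : Int) ^ (i - 1).toNat := by
    have := pow_pos (show (0:Int) < 2 by norm_num) (i - 1).toNat; omega
  intro fuel
  induction fuel with
  | zero =>
      intro t k f ht hfu hk
      have ht' : t = (2 : Int) ^ (i - 1).toNat + 1 := by
        have : ((0:Nat) : Int) = 0 := rfl
        push_cast at hfu; omega
      have hkN : k = ((pvN size : Nat) : Int) := by
        rw [hk, if_neg (by omega), ← hQN, ht']; ring
      rw [pvTempLoopA]
      exact pvRep_congr (fun j _ _ => by rw [if_neg (by omega)])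
  | succ n ih =>
      intro t k f ht hfu hk
      have hfu' : t + (n : Int) + 1 = (2 : Int) ^ (i - 1).toNat + 1 := by push_cast at hfu; omega
      have htP : t ≤ (2 : Int) ^ (i - 1).toNat := by omega
      have hk0 : 0 ≤ k := by
        rw [hk]; split
        · omega
        · exact mul_nonneg hQ.le (by omega)
      have hkb1 : k ≤ pvQ size i * (2 * t - 1) := by
        rw [hk]; split
        · rename_i h1; rw [h1]; norm_num; omega
        · exact mul_le_mul_of_nonneg_left (by omega) hQ.le
      have hP0 : (0:Int) ≤ (2 : Int) ^ (i - 1).toNat := by omega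
      have hb12 : pvQ size i * (2 * t - 1) ≤ pvQ size i * (2 * t) :=
        mul_le_mul_of_nonneg_left (by omega) hQ.le
      have hb1N : pvQ size i * (2 * t - 1) ≤ ((pvN size : Nat) : Int) := by
        rw [← hQN]; exact mul_le_mul_of_nonneg_left (by omega) hQ.le
      have hb2N : pvQ size i * (2 * t) ≤ ((pvN size : Nat) : Int) := by
        rw [← hQN]; exact mul_le_mul_of_nonneg_left (by omega) hQ.le
      have hb10 : 0 ≤ pvQ size i * (2 * t - 1) := mul_nonneg hQ.le (by omega)
      rw [pvTempLoopA, if_pos htP]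
      show pvTempLoopA size fp sp i n (t + 1) _ _ = _
      rw [show ((2 : Int) ^ (size - i).toNat) = pvQ size i from rfl]
      rw [pvAssignA_spec i fp _ (pvN size) hb1N _ k f hk0 rfl]
      simp only [max_eq_right hkb1]
      rw [pvAssignA_spec i sp _ (pvN size) hb2N _ _ _ hb10 rfl]
      simp only [max_eq_right hb12]
      rw [ih (t + 1) _ _ (by omega) (by omega) (by rw [if_neg (by omega)]; ring)]
      apply pvRep_congr
      intro j hj0 hjN
      by_cases c1 : k ≤ j ∧ j < pvQ size i * (2 * t - 1)
      · -- first block: value fp, j / Q = 2t - 2 (even)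
        have hlow : pvQ size i * (2 * t - 2) ≤ j := by
          rcases c1 with ⟨hkj, _⟩
          rw [hk] at hkj
          by_cases h1 : t = 1
          · rw [h1]; norm_num; omega
          · rw [if_neg h1] at hkj; exact hkj
        have hdiv : j / pvQ size i = 2 * t - 2 :=
          pvDiv_eq hQ hlow (by
            calc j < pvQ size i * (2 * t - 1) := c1.2
              _ = pvQ size i * ((2 * t - 2) + 1) := by ring)
        rw [if_neg (by omega), if_neg (by omega), if_pos c1, if_pos ⟨c1.1, hjN⟩]
        unfold pvVal
        rw [hdiv, if_pos (by omega)]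
      · by_cases c2 : pvQ size i * (2 * t - 1) ≤ j ∧ j < pvQ size i * (2 * t)
        · -- second block: value sp, j / Q = 2t - 1 (odd)
          have hdiv : j / pvQ size i = 2 * t - 1 :=
            pvDiv_eq hQ c2.1 (by
              calc j < pvQ size i * (2 * t) := c2.2
                _ = pvQ size i * ((2 * t - 1) + 1) := by ring)
          rw [if_neg (by omega), if_pos c2, if_neg c1, if_pos ⟨by omega, hjN⟩]
          unfold pvVal
          rw [hdiv, if_neg (by omega)]
        · by_cases c3 : pvQ size i * (2 * t) ≤ j
          · rw [if_pos ⟨c3, hjN⟩, if_neg c2, if_neg c1, if_pos ⟨by omega, hjN⟩]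
          · rw [if_neg (by omega), if_neg c2, if_neg c1, if_neg (by omega)]

-- the `K[0][i] = first_param` loop only rewrites row 0
lemma pvPhase2 (fp : Int) (N : Nat) (hN : 0 < N) :
    ∀ (l : List Int) (f : Int → PySem.Dict Int Int),
      l.foldl (fun K i => K.insert 0 ((K.getD 0 PySem.Dict.empty).insert i fp)) (pvRep N f) =
        pvRep N (fun j => if j = 0 then l.foldl (fun d i => d.insert i fp) (f 0) else f j) := by
  intro l
  induction l with
  | nil =>
      intro f
      exact (pvRep_congr (fun j _ _ => by split <;> simp_all)).symm
  | cons i l ih =>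
      intro f
      rw [List.foldl_cons]
      have hN' : (0:Int) < (N : Int) := by exact_mod_cast hN
      rw [pvRep_getD 0 le_rfl hN', pvRep_insert 0 le_rfl hN', ih]
      apply pvRep_congr
      intro j _ _
      by_cases hj0 : j = 0
      · rw [if_pos hj0, if_pos hj0, List.foldl_cons, if_pos (rfl : (0:Int) = 0)]
      · rw [if_neg hj0, if_neg hj0, if_neg hj0]

-- the big per-customer loop rewrites every row 1 ≤ j < N cell by cell to pvVal
lemma pvPhase3 (size fp sp : Int) :
    ∀ (l : List Int) (f : Int → PySem.Dict Int Int), (∀ i ∈ l, 1 ≤ i ∧ i ≤ size) →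
      l.foldl (fun K i => pvTempLoopA size fp sp i ((2 : Int) ^ (i - 1).toNat).toNat 1 1 K) (pvRep (pvN size) f) =
        pvRep (pvN size) (fun j => if 1 ≤ j ∧ j < ((pvN size : Nat) : Int) then l.foldl (fun d i => d.insert i (pvVal size fp sp i j)) (f j) else f j) := by
  intro l
  induction l with
  | nil =>
      intro f _
      exact (pvRep_congr (fun j _ _ => by split <;> rfl)).symm
  | cons i l ih =>
      intro f hmem
      obtain ⟨hi1, his⟩ := hmem i (List.mem_cons_self ..)
      rw [List.foldl_cons]
      rw [pvTempLoopA_spec size fp sp i hi1 his _ 1 1 f le_rfl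
            (by rw [Int.toNat_of_nonneg (by positivity)]; ring) (by rw [if_pos rfl])]
      rw [ih _ (fun x hx => hmem x (List.mem_cons_of_mem _ hx))]
      apply pvRep_congr
      intro j _ _
      by_cases hc : 1 ≤ j ∧ j < ((pvN size : Nat) : Int)
      · rw [if_pos hc, if_pos hc, if_pos hc, List.foldl_cons]
      · rw [if_neg hc, if_neg hc, if_neg hc]

-- cell values agree: A's sweep value is B's bit formula
lemma pvVal_eq_rowbit (size fp sp i j : Int) :
    pvVal size fp sp i j =
      (if PySem.Int.mod (PySem.Int.floordiv j ((2 : Int) ^ (size - i).toNat)) 2 ≠ 0 then sp else fp) := by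
  have hQ : (0:Int) < (2 : Int) ^ (size - i).toNat := pow_pos (by norm_num) _
  rw [PySem.Int.floordiv_eq_ediv_of_pos hQ, PySem.Int.mod_eq_emod_of_pos (by norm_num)]
  unfold pvVal pvQ
  by_cases h : (j / (2 : Int) ^ (size - i).toNat) % 2 = 0
  · rw [if_pos h, if_neg (by omega)]
  · rw [if_neg h, if_pos (by omega)]

-- ===== VERDICT (by name: the statement is the Claim_ definition above) =====
theorem set_scenarios_spec : Claim_equal_set_scenarios := by
  intro size fp sp _
  unfold Spec_set_scenarios
  by_cases hs : 0 ≤ size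
  · -- size ≥ 0: both sides reduce to the canonical matrix with rows given by the bit formula
    have hN1 : (0:Nat) < pvN size := by unfold pvN; rw [if_pos hs]; positivity
    have hfuel : (if 0 ≤ size then 2 ^ size.toNat else 1) = pvN size := by
      unfold pvN; simp only [if_pos hs]
    have hmem : ∀ i ∈ PySem.List.pyRange 1 (size+1) 1, 1 ≤ i ∧ i ≤ size := by
      intro i hi
      rw [PySem.List.mem_pyRange_one] at hi
      omega
    have hempty : ∀ p ∈ (PySem.Dict.empty : PySem.Dict Int (PySem.Dict Int Int)).items, p.1 < 0 := by
      intro p hp; simp [PySem.Dict.empty] at hp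
    have hinit : pvInitLoopA size (pvN size) 0 PySem.Dict.empty = pvRep (pvN size) (fun _ => PySem.Dict.empty) := by
      rw [pvInitLoopA_items size (pvN size) 0 PySem.Dict.empty le_rfl (by ring) hempty]
      apply PySem.Dict.ext
      show (PySem.Dict.empty : PySem.Dict Int (PySem.Dict Int Int)).items ++ _ = _
      rw [show (PySem.Dict.empty : PySem.Dict Int (PySem.Dict Int Int)).items = [] from rfl,
          List.nil_append, pvRep_items]
      apply List.map_congr_left
      intro a _
      rw [zero_add]
    unfold set_scenarios set_scenarios_alt
    rw [hfuel, hinit, pvPhase2 fp (pvN size) hN1, pvPhase3 size fp sp _ _ hmem,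
        pvScenLoopB_items size fp sp (pvN size) 0 PySem.Dict.empty le_rfl (by ring) hempty]
    show ((pvRep (pvN size) _).items).map _ = _
    rw [pvRep_items]
    show _ = ((PySem.Dict.mk ((PySem.Dict.empty : PySem.Dict Int (PySem.Dict Int Int)).items ++ _) : PySem.Dict Int (PySem.Dict Int Int)).items).map _
    rw [show (PySem.Dict.empty : PySem.Dict Int (PySem.Dict Int Int)).items = [] from rfl]
    show _ = ([] ++ (List.range (pvN size)).map _).map _
    rw [List.nil_append, List.map_map, List.map_map]
    apply List.map_congr_left
    intro a ha
    rw [List.mem_range] at ha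
    have haN : ((a : Nat) : Int) < ((pvN size : Nat) : Int) := by exact_mod_cast ha
    simp only [Function.comp_apply, zero_add, Prod.mk.injEq]
    refine ⟨trivial, ?_⟩
    congr 1
    unfold pvRowB
    by_cases ha0 : (a : Int) = 0
    · rw [if_neg (by omega), if_pos ha0, ha0]
      apply PySem.List.foldl_congr_mem
      intro acc x _
      show acc.insert x fp = acc.insert x _
      have hQ : (0:Int) < (2 : Int) ^ (size - x).toNat := pow_pos (by norm_num) _
      rw [PySem.Int.floordiv_eq_ediv_of_pos hQ, PySem.Int.mod_eq_emod_of_pos (by norm_num)]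
      norm_num
    · rw [if_pos (show (1:Int) ≤ (a : Int) ∧ (a : Int) < ((pvN size : Nat) : Int) from ⟨by omega, haN⟩),
          if_neg ha0]
      apply PySem.List.foldl_congr_mem
      intro acc x _
      show acc.insert x (pvVal size fp sp x (a : Int)) = acc.insert x _
      rw [pvVal_eq_rowbit size fp sp x (a : Int)]
  · -- size < 0: the while runs exactly once, range(1, size+1) is empty: both return {0: {}}
    have hrange : PySem.List.pyRange 1 (size+1) 1 = [] := by
      simp [PySem.List.pyRange]; omega
    by_cases hs2 : -1074 ≤ size
    · -- 2**size is a positive float < 1: the while runs exactly once; both return {0: {}}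
      have hcondA : pvLtPow2A 0 size = true := by
        unfold pvLtPow2A; rw [if_neg hs, if_pos hs2]; simp
      have hcondB : pvLtPow2B 0 size = true := by
        unfold pvLtPow2B; rw [if_neg hs, if_pos hs2]; simp
      have hA : set_scenarios size fp sp = [((0:Int), [])] := by
        unfold set_scenarios
        rw [hrange, if_neg hs, pvInitLoopA]
        simp only [hcondA, if_true]
        rw [pvInitLoopA]
        rfl
      have hB : set_scenarios_alt size fp sp = [((0:Int), [])] := by
        unfold set_scenarios_alt
        rw [if_neg hs, pvScenLoopB]
        simp only [hcondB, if_true]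
        rw [pvScenLoopB]
        unfold pvRowB
        rw [hrange]
        rfl
      rw [hA, hB]
    · -- 2**size underflows to 0.0: the while never runs; both return {}
      have hcondA : pvLtPow2A 0 size = false := by
        unfold pvLtPow2A; rw [if_neg hs, if_neg hs2]; simp
      have hcondB : pvLtPow2B 0 size = false := by
        unfold pvLtPow2B; rw [if_neg hs, if_neg hs2]; simp
      have hA : set_scenarios size fp sp = [] := by
        unfold set_scenarios
        rw [hrange, if_neg hs, pvInitLoopA]
        simp only [hcondA, Bool.false_eq_true, if_false]
        rfl
      have hB : set_scenarios_alt size fp sp = [] := by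
        unfold set_scenarios_alt
        rw [if_neg hs, pvScenLoopB]
        simp only [hcondB, Bool.false_eq_true, if_false]
        rfl
      rw [hA, hB]
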